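-- pv_equiv track=rewrite | github.com/saatvikj/VPool | server.py | marker_to_js
-- ===== SOURCE A (Python) =====
-- def marker_to_js(route):
-- 	"""
-- 	Function to return the popup text for all the
-- 	markers that will appear on the map using
-- 	leaflet.js
--
-- 	Args:
-- 		route: The route that the vehicle will
-- 		be following. It is also the order in
-- 		which markers are added to the map.
--
-- 	Returns:
-- 		A list of strings corresponding to each
-- 		marker in the map and a list telling the
-- 		order of points, S or D.
-- 	"""
-- 	sources = []
-- 	popup = []
-- 	order = []
-- 	for i in route:
-- 		if i not in sources:
-- 			sources.append(i)
-- 			popup.append('Source of '+str(i))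
-- 			order.append('S')
-- 		else:
-- 			popup.append('Destination of '+str(i))
-- 			order.append('D')
--
-- 	return popup, order
-- ===== SOURCE B (Python) =====
-- def marker_to_js(route):
--     # Index-based algorithm: build a dict mapping each value to the index of its
--     # FIRST occurrence, then a position is a Source exactly when it IS that first
--     # index (no seen-set is maintained during labeling).
--     first = {}
--     for idx, v in enumerate(route):
--         first.setdefault(v, idx)
--     order = ['S' if first[v] == idx else 'D' for idx, v in enumerate(route)]
--     popup = [('Source of ' if o == 'S' else 'Destination of ') + str(v)
--              for v, o in zip(route, order)]
--     return popup, order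
-- ===== Notes on version B (the rewrite author's own statement) =====
-- stated objective: faster
-- what changed: B replaces A's fused loop with a growing membership list by an index-based algorithm: one pass builds a first-occurrence-index dict with setdefault, then labels are computed by comparing each position with that first index and popups by mapping over zip(route, order).
import Mathlib
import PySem

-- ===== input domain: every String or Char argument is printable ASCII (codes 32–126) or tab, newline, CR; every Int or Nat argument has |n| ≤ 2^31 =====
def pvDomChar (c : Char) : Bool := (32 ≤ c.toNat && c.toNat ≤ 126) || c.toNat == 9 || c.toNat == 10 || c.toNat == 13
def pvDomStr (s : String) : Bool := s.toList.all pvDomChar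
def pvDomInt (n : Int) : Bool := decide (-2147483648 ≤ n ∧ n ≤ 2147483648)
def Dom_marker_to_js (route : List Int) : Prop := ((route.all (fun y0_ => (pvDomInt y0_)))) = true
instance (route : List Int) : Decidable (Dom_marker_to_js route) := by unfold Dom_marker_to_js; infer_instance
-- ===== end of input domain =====

-- B replaces A's fused seen-list loop by an index-based algorithm: a first-occurrence-index
-- dict built with setdefault over enumerate, then labels by comparing each index with that
-- first index; faster in a timing run (A scans a growing source list per element).


-- ===== PORT A =====
-- one fused loop over route, state (sources, popup, order), linear membership test on sources
def markerStepA (st : List Int × List String × List String) (i : Int) :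
    List Int × List String × List String :=
  if ¬ st.1.contains i then
    (st.1 ++ [i], st.2.1 ++ ["Source of " ++ PySem.Int.toStr i], st.2.2 ++ ["S"])
  else
    (st.1, st.2.1 ++ ["Destination of " ++ PySem.Int.toStr i], st.2.2 ++ ["D"])

def marker_to_js (route : List Int) : List String × List String :=
  let st := route.foldl markerStepA ([], [], [])
  (st.2.1, st.2.2)

-- ===== PORT B =====
-- first pass: dict of each value's FIRST index, built with setdefault over enumerate
def markerFirstIdxB (route : List Int) : PySem.Dict Int Int :=
  (PySem.List.enumerate route 0).foldl (fun d p => d.setdefault p.2 p.1) PySem.Dict.empty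

-- order: 'S' exactly at an element's first index (first[v] == idx; v is always a key)
def markerOrderB (route : List Int) : List String :=
  (PySem.List.enumerate route 0).map
    (fun p => if (markerFirstIdxB route).get? p.2 = some p.1 then "S" else "D")

def markerPopupB (p : Int × String) : String :=
  (if p.2 = "S" then "Source of " else "Destination of ") ++ PySem.Int.toStr p.1

def marker_to_js_alt (route : List Int) : List String × List String :=
  let order := markerOrderB route
  ((route.zip order).map markerPopupB, order)

-- ===== PRECONDITION & SPEC =====
def Spec_marker_to_js (route : List Int) (out : List String × List String) : Prop := out = marker_to_js_alt route
instance (route : List Int) (out : List String × List String) : Decidable (Spec_marker_to_js route out) := by unfold Spec_marker_to_js; infer_instance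

-- ===== CLAIM (what is proved, stated in full; the proofs are below) =====
def Claim_equal_marker_to_js : Prop := ∀ (route : List Int), Dom_marker_to_js route → Spec_marker_to_js route (marker_to_js route)

-- ===== LEMMAS AND PROOFS =====

-- the S/D order A's loop produces, characterised recursively over the remaining route
def recOrderA (s : List Int) : List Int → List String
  | [] => []
  | i :: rest => if s.contains i then "D" :: recOrderA s rest else "S" :: recOrderA (s ++ [i]) rest

lemma marker_main (route : List Int) : ∀ (s : List Int) (p o : List String),
    route.foldl markerStepA (s, p, o) =
      ((route.foldl markerStepA (s, p, o)).1,
       p ++ (route.zip (recOrderA s route)).map markerPopupB,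
       o ++ recOrderA s route) := by
  induction route with
  | nil => intro s p o; simp [recOrderA]
  | cons i rest ih =>
    intro s p o
    by_cases h : s.contains i
    · simp only [List.foldl_cons, markerStepA, h, recOrderA, not_true_eq_false, if_false,
        if_true, List.zip_cons_cons, List.map_cons]
      rw [ih]
      simp [markerPopupB]
    · simp only [List.foldl_cons, markerStepA, h, recOrderA, not_false_eq_true, if_true,
        Bool.false_eq_true, if_false, List.zip_cons_cons, List.map_cons]
      rw [ih]
      simp [markerPopupB]

-- the setdefault fold keeps the FIRST index seen for each key
lemma fold_setdefault_get (l : List Int) : ∀ (s : Int) (d : PySem.Dict Int Int) (v : Int),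
    ((PySem.List.enumerate l s).foldl (fun d p => d.setdefault p.2 p.1) d).get? v =
      (match d.get? v with
       | some x => some x
       | none => if v ∈ l then some (s + (l.idxOf v : Int)) else none) := by
  induction l with
  | nil =>
    intro s d v
    cases hdv : d.get? v <;> simp [PySem.List.enumerate_nil, hdv]
  | cons a rest ih =>
    intro s d v
    rw [PySem.List.enumerate_cons]
    simp only [List.foldl_cons]
    rw [ih]
    cases hdv : d.get? v with
    | some x =>
      have hdv' : (d.setdefault a s).get? v = some x := by
        by_cases hva : v = a
        · subst hva
          rw [PySem.Dict.get?_setdefault_self, hdv]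
          rfl
        · rw [PySem.Dict.get?_setdefault_of_ne d s hva, hdv]
      simp [hdv']
    | none =>
      by_cases hva : v = a
      · subst hva
        have hdv' : (d.setdefault v s).get? v = some s := by
          rw [PySem.Dict.get?_setdefault_self, hdv]; rfl
        simp [hdv', List.idxOf_cons_self]
      · have hdv' : (d.setdefault a s).get? v = none := by
          rw [PySem.Dict.get?_setdefault_of_ne d s hva, hdv]
        rw [hdv']
        by_cases hvr : v ∈ rest
        · have hmem : v ∈ a :: rest := List.mem_cons_of_mem _ hvr
          have hidx : List.idxOf v (a :: rest) = (List.idxOf v rest) + 1 := by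
            simpa [Nat.succ_eq_add_one] using List.idxOf_cons_ne (a := v) (b := a) rest (Ne.symm hva)
          simp only [hvr, if_true, hmem, hidx]
          congr 1
          push_cast
          ring
        · have hmem : v ∉ a :: rest := by
            intro hc
            rcases List.mem_cons.mp hc with h1 | h2
            · exact hva h1
            · exact hvr h2
          simp [hvr, hmem]

lemma firstIdx_get (l : List Int) (v : Int) :
    (markerFirstIdxB l).get? v = if v ∈ l then some ((l.idxOf v : Nat) : Int) else none := by
  unfold markerFirstIdxB
  rw [fold_setdefault_get l 0 PySem.Dict.empty v]
  simp

-- B's index-comparison labels agree with A's seen-set recursion, via the prefix invariant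
lemma orderB_main (l : List Int) : ∀ (pre s : List Int), (∀ x, x ∈ s ↔ x ∈ pre) →
    (PySem.List.enumerate l (pre.length : Int)).map
        (fun p => if (markerFirstIdxB (pre ++ l)).get? p.2 = some p.1 then "S" else "D")
      = recOrderA s l := by
  induction l with
  | nil => intro pre s _; simp [PySem.List.enumerate_nil, recOrderA]
  | cons a rest ih =>
    intro pre s hs
    rw [PySem.List.enumerate_cons]
    simp only [List.map_cons, recOrderA]
    have hmem : a ∈ pre ++ a :: rest := by simp
    have hget := firstIdx_get (pre ++ a :: rest) a
    rw [if_pos hmem] at hget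
    by_cases hpa : a ∈ pre
    · -- a seen before: its first index is inside pre, strictly below pre.length → "D"
      have hlt : List.idxOf a (pre ++ a :: rest) < pre.length := by
        rw [List.idxOf_append_of_mem hpa]
        exact List.idxOf_lt_length_of_mem hpa
      have hne : (markerFirstIdxB (pre ++ a :: rest)).get? a ≠ some (pre.length : Int) := by
        rw [hget]
        intro hc
        have := Option.some.injEq _ _ ▸ hc
        omega
      have hsc : s.contains a = true := List.contains_iff_mem.mpr ((hs a).mpr hpa)
      rw [if_neg hne, hsc, if_pos rfl]
      have hpre' : ∀ x, x ∈ s ↔ x ∈ pre ++ [a] := by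
        intro x
        rw [hs x]
        simp only [List.mem_append, List.mem_singleton]
        constructor
        · exact Or.inl
        · rintro (h | rfl)
          · exact h
          · exact hpa
      have hthis := ih (pre ++ [a]) s hpre'
      rw [List.append_assoc] at hthis
      simp only [List.length_append, List.length_singleton] at hthis
      rw [show (((pre.length + 1 : Nat)) : Int) = (pre.length : Int) + 1 by push_cast; ring] at hthis
      exact congrArg (List.cons "D") hthis
    · -- a new: its first index IS pre.length → "S"
      have hidx : List.idxOf a (pre ++ a :: rest) = pre.length := by
        rw [List.idxOf_append_of_notMem hpa, List.idxOf_cons_self]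
        omega
      have heq : (markerFirstIdxB (pre ++ a :: rest)).get? a = some (pre.length : Int) := by
        rw [hget, hidx]
      have hsc : s.contains a = false := by
        rw [List.contains_eq_mem, decide_eq_false_iff_not]
        exact fun hc => hpa ((hs a).mp hc)
      rw [if_pos heq, hsc]
      simp only [Bool.false_eq_true, if_false]
      have hpre' : ∀ x, x ∈ s ++ [a] ↔ x ∈ pre ++ [a] := by
        intro x
        simp only [List.mem_append, List.mem_singleton, hs x]
      have hthis := ih (pre ++ [a]) (s ++ [a]) hpre'
      rw [List.append_assoc] at hthis
      simp only [List.length_append, List.length_singleton] at hthis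
      rw [show (((pre.length + 1 : Nat)) : Int) = (pre.length : Int) + 1 by push_cast; ring] at hthis
      exact congrArg (List.cons "S") hthis

lemma orderB_eq_recOrderA (route : List Int) : markerOrderB route = recOrderA [] route := by
  have := orderB_main route [] [] (by intro x; simp)
  simpa [markerOrderB] using this

-- ===== VERDICT (by name: the statement is the Claim_ definition above) =====
theorem marker_to_js_spec : Claim_equal_marker_to_js := by
  intro route _
  unfold Spec_marker_to_js marker_to_js marker_to_js_alt
  rw [marker_main route [] [] []]
  rw [orderB_eq_recOrderA]
  rfl
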